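-- pv_equiv track=rewrite | github.com/bmmtstb/adventofcode | 2021/Day14.py | perform_pair_insertion
-- ===== SOURCE A (Python) =====
-- from typing import Dict, List, Tuple, Set
--
-- def perform_pair_insertion(start: str, rules: Dict[str, str], nof_steps: int) -> str:
--     """Perform multiple steps of pairwise insertion"""
--     curr_str = start
--     for n in range(nof_steps):
--         new_str = curr_str
--         for i in range(len(curr_str) - 2, -1, -1):
--             substr = curr_str[i:i+2]
--             if substr in rules.keys():
--                 insert_val = rules[substr]
--                 new_str = new_str[:i+1] + str(insert_val) + new_str[i+1:]
--         curr_str = new_str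
--     return curr_str
-- ===== SOURCE B (Python) =====
-- def perform_pair_insertion(start: str, rules: dict, nof_steps: int) -> str:
--     """Perform multiple steps of pairwise insertion (one left-to-right join per step; stops at a fixpoint)."""
--     s = start
--     k = nof_steps
--     while k > 0 and len(s) >= 2:
--         t = s[0] + ''.join(rules.get(a + b, '') + b for a, b in zip(s, s[1:]))
--         if t == s:
--             break
--         s = t
--         k -= 1
--     return s
-- ===== Notes on version B (the rewrite author's own statement) =====
-- stated objective: faster
-- what changed: Per step, instead of scanning indices right-to-left and splicing each insertion into a growing copy via slicing (quadratic per step), B rebuilds the string once left-to-right by joining rules.get(pair,'')+next_char over consecutive pairs, and stops early when a step inserts nothing (fixpoint) or fewer than 2 characters remain.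
import Mathlib
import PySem

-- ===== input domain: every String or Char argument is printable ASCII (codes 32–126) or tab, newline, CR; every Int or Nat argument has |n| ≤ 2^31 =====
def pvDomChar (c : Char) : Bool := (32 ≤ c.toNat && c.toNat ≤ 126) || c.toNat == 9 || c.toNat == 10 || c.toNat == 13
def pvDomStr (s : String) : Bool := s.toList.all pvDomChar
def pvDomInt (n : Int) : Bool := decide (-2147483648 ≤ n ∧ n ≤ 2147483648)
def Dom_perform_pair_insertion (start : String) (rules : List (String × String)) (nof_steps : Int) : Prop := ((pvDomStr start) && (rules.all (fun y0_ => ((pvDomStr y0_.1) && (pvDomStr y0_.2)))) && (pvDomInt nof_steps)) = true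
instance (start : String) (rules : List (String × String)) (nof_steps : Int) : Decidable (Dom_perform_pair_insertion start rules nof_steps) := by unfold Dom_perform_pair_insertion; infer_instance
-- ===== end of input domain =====

-- B rebuilds each step's string in ONE left-to-right join over consecutive pairs instead of A's
-- right-to-left index scan that splices every insertion into a growing copy by slicing (objective: faster).

-- ===== PORT A =====
-- body of A's inner loop: 'substr = curr_str[i:i+2]; if substr in rules: new_str = new_str[:i+1] + rules[substr] + new_str[i+1:]'
def pvInsOne (rules : List (String × String)) (curr : List Char) (new_str : List Char) (i : Int) : List Char :=
  let substr := PySem.List.slice curr (some i) (some (i + 2))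
  match (PySem.Dict.mk rules).get? (String.ofList substr) with
  | some v => PySem.List.slice new_str none (some (i + 1)) ++ v.toList ++ PySem.List.slice new_str (some (i + 1)) none
  | none => new_str

-- one outer-loop iteration of A: 'for i in range(len(curr_str)-2, -1, -1): …'
def pvStepA (rules : List (String × String)) (curr : List Char) : List Char :=
  (PySem.List.pyRange ((curr.length : Int) - 2) (-1) (-1)).foldl (pvInsOne rules curr) curr

def perform_pair_insertion (start : String) (rules : List (String × String)) (nof_steps : Int) : String :=
  String.ofList ((PySem.List.pyRange 0 nof_steps 1).foldl (fun curr _ => pvStepA rules curr) start.toList)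

-- ===== PORT B =====
-- one step of B: s[0] + ''.join(rules.get(a+b,'') + b for a, b in zip(s, s[1:]))
def pvStepB (rules : List (String × String)) (s : List Char) : List Char :=
  match s with
  | [] => []
  | c :: rest =>
    c :: (s.zip rest).flatMap (fun ab => ((PySem.Dict.mk rules).getD (String.ofList [ab.1, ab.2]) "").toList ++ [ab.2])

-- B's while loop: 'while k > 0 and len(s) >= 2: t = step(s); if t == s: break; s = t; k -= 1'
def pvLoopB (rules : List (String × String)) (s : List Char) (k : Int) : List Char :=
  if h : 0 < k ∧ 2 ≤ s.length then
    let t := pvStepB rules s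
    if t = s then s else pvLoopB rules t (k - 1)
  else s
termination_by k.toNat
decreasing_by omega

def perform_pair_insertion_alt (start : String) (rules : List (String × String)) (nof_steps : Int) : String :=
  String.ofList (pvLoopB rules start.toList nof_steps)

-- ===== PRECONDITION & SPEC =====
def Spec_perform_pair_insertion (start : String) (rules : List (String × String)) (nof_steps : Int) (out : String) : Prop := out = perform_pair_insertion_alt start rules nof_steps
instance (start : String) (rules : List (String × String)) (nof_steps : Int) (out : String) : Decidable (Spec_perform_pair_insertion start rules nof_steps out) := by unfold Spec_perform_pair_insertion; infer_instance

-- ===== CLAIM (what is proved, stated in full; the proofs are below) =====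
def Claim_equal_perform_pair_insertion : Prop := ∀ (start : String) (rules : List (String × String)) (nof_steps : Int), Dom_perform_pair_insertion start rules nof_steps → Spec_perform_pair_insertion start rules nof_steps (perform_pair_insertion start rules nof_steps)

-- ===== LEMMAS AND PROOFS =====

-- the fully-expanded tail of a step: for s = a :: b :: t, ins(a,b) ++ b :: pvP (b :: t)
def pvP (rules : List (String × String)) : List Char → List Char
  | a :: b :: t => ((PySem.Dict.mk rules).getD (String.ofList [a, b]) "").toList ++ b :: pvP rules (b :: t)
  | _ => []

theorem pvP_short (rules : List (String × String)) (s : List Char) (h : s.length ≤ 1) :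
    pvP rules s = [] := by
  match s with
  | [] => rfl
  | [a] => rfl
  | a :: b :: t => simp at h

theorem pvZip (rules : List (String × String)) : ∀ (b : Char) (t : List Char),
    (((b :: t)).zip t).flatMap (fun ab => ((PySem.Dict.mk rules).getD (String.ofList [ab.1, ab.2]) "").toList ++ [ab.2]) = pvP rules (b :: t)
  | _, [] => rfl
  | b, c :: t => by
    simp only [List.zip_cons_cons, List.flatMap_cons, pvP]
    rw [pvZip rules c t]
    simp

theorem pvStepB_eq (rules : List (String × String)) (s : List Char) :
    pvStepB rules s = s.take 1 ++ pvP rules s := by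
  match s with
  | [] => rfl
  | c :: rest =>
    simp only [pvStepB, List.take_succ_cons, List.take_zero, List.singleton_append]
    rw [pvZip rules c rest]

theorem pvBody (rules : List (String × String)) (curr : List Char) (j : Nat) (h : j + 2 ≤ curr.length) :
    pvInsOne rules curr (curr.take (j + 2) ++ pvP rules (curr.drop (j + 1))) (j : Int) =
      curr.take (j + 1) ++ pvP rules (curr.drop j) := by
  have hj1 : j + 1 < curr.length := by omega
  have hj0 : j < curr.length := by omega
  have hdropj : curr.drop j = curr[j] :: curr[j+1] :: curr.drop (j + 2) := by
    rw [List.drop_eq_getElem_cons hj0, List.drop_eq_getElem_cons hj1]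
  have hsub : PySem.List.slice curr (some (j : Int)) (some ((j : Int) + 2)) = [curr[j], curr[j+1]] := by
    have : ((j : Int) + 2) = ((j : Int) + ((2 : Nat) : Int)) := by norm_num
    rw [this, PySem.List.slice_natCast_add, hdropj]
    rfl
  have hlentake : (curr.take (j + 2)).length = j + 2 := by
    simp [List.length_take]; omega
  have htake : (curr.take (j + 2) ++ pvP rules (curr.drop (j + 1))).take (j + 1) = curr.take (j + 1) := by
    rw [List.take_append_of_le_length (by omega), List.take_take]
    congr 1; omega
  have hdrop : (curr.take (j + 2) ++ pvP rules (curr.drop (j + 1))).drop (j + 1) =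
      curr[j+1] :: pvP rules (curr.drop (j + 1)) := by
    rw [List.drop_append_of_le_length (by omega)]
    rw [List.drop_take]
    have hd : curr.drop (j+1) = curr[j+1] :: curr.drop (j + 2) := List.drop_eq_getElem_cons hj1
    rw [hd]
    have h2 : j + 2 - (j + 1) = 1 := by omega
    rw [h2]
    rfl
  have hdropj1 : curr.drop (j + 1) = curr[j+1] :: curr.drop (j + 2) := List.drop_eq_getElem_cons hj1
  have htakesucc : curr.take (j + 2) = curr.take (j + 1) ++ [curr[j+1]] := by
    rw [List.take_add_one, List.getElem?_eq_getElem hj1]; rfl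
  unfold pvInsOne
  rw [hsub]
  cases hget : (PySem.Dict.mk rules).get? (String.ofList [curr[j], curr[j+1]]) with
  | none =>
    simp only [hget]
    conv_rhs => rw [hdropj, pvP]
    rw [PySem.Dict.getD_of_get?_eq_none _ _ hget, htakesucc, ← hdropj1,
      show ("" : String).toList = [] from rfl]
    simp only [List.append_assoc, List.singleton_append, List.nil_append]
  | some v =>
    simp only [hget]
    have h1 : ((j : Int) + 1) = (((j + 1 : Nat) : Int)) := by push_cast; ring
    rw [h1, PySem.List.slice_to_natCast, PySem.List.slice_from_natCast, htake, hdrop]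
    conv_rhs => rw [hdropj, pvP]
    rw [PySem.Dict.getD_of_get?_eq_some _ _ hget]
    rw [← hdropj1]
    simp

theorem pvInv (rules : List (String × String)) (curr : List Char) : ∀ (j : Nat), j + 2 ≤ curr.length →
    (PySem.List.pyRange (j : Int) (-1) (-1)).foldl (pvInsOne rules curr)
      (curr.take (j + 2) ++ pvP rules (curr.drop (j + 1))) = curr.take 1 ++ pvP rules curr := by
  intro j
  induction j with
  | zero =>
    intro h
    rw [PySem.List.pyRange_neg_one_cons (by norm_num), PySem.List.pyRange_neg_one_eq_nil (by norm_num)]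
    simp only [List.foldl_cons, List.foldl_nil]
    have := pvBody rules curr 0 h
    simpa using this
  | succ j ih =>
    intro h
    rw [PySem.List.pyRange_neg_one_cons (by exact_mod_cast by omega : (-1 : Int) < ((j + 1 : Nat) : Int))]
    simp only [List.foldl_cons]
    have hb := pvBody rules curr (j + 1) h
    rw [show ((j + 1 : Nat) : Int) = ((j : Int) + 1) from by push_cast; ring] at hb ⊢
    rw [show (((j:Int) + 1) - 1) = (j : Int) from by ring]
    rw [show (j + 1 + 2) = (j + 1 + 1 + 1) from rfl] at hb
    rw [hb]
    exact ih (by omega)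

theorem pvStepA_eq (rules : List (String × String)) (curr : List Char) :
    pvStepA rules curr = curr.take 1 ++ pvP rules curr := by
  unfold pvStepA
  by_cases h : 2 ≤ curr.length
  · have hc : ((curr.length : Int) - 2) = ((curr.length - 2 : Nat) : Int) := by push_cast [h]; omega
    rw [hc]
    have hinit : curr = curr.take ((curr.length - 2) + 2) ++ pvP rules (curr.drop ((curr.length - 2) + 1)) := by
      rw [pvP_short rules _ (by simp [List.length_drop]; omega)]
      rw [List.append_nil, List.take_of_length_le (by omega)]
    have hiv := pvInv rules curr (curr.length - 2) (by omega)
    rw [← hinit] at hiv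
    exact hiv
  · rw [PySem.List.pyRange_neg_one_eq_nil (by omega : (curr.length : Int) - 2 ≤ -1)]
    simp only [List.foldl_nil]
    match curr, h with
    | [], _ => rfl
    | [a], _ => rfl
    | a :: b :: t, h => simp at h

theorem pvStepA_eq_stepB (rules : List (String × String)) (curr : List Char) :
    pvStepA rules curr = pvStepB rules curr := by
  rw [pvStepA_eq, pvStepB_eq]

theorem pvStepA_short (rules : List (String × String)) (s : List Char) (h : s.length < 2) :
    pvStepA rules s = s := by
  rw [pvStepA_eq, pvP_short rules s (by omega), List.append_nil, List.take_of_length_le (by omega)]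

theorem pvIter_short (rules : List (String × String)) (s : List Char) (h : s.length < 2) :
    ∀ (n : Nat), (pvStepA rules)^[n] s = s := by
  intro n
  induction n with
  | zero => rfl
  | succ n ih => rw [Function.iterate_succ_apply, pvStepA_short rules s h, ih]

theorem pvFoldl_ignore_iterate {α β : Type} (g : α → α) : ∀ (l : List β) (s : α),
    l.foldl (fun c _ => g c) s = g^[l.length] s
  | [], s => rfl
  | _ :: t, s => by
    simp only [List.foldl_cons, List.length_cons, Function.iterate_succ_apply]
    exact pvFoldl_ignore_iterate g t (g s)

theorem pvIter_fix (rules : List (String × String)) (s : List Char) (hfix : pvStepA rules s = s) :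
    ∀ (n : Nat), (pvStepA rules)^[n] s = s := by
  intro n
  induction n with
  | zero => rfl
  | succ n ih => rw [Function.iterate_succ_apply, hfix, ih]

theorem pvLoop_eq (rules : List (String × String)) : ∀ (n : Nat) (k : Int), k.toNat = n →
    ∀ (s : List Char), (pvStepA rules)^[n] s = pvLoopB rules s k := by
  intro n
  induction n with
  | zero =>
    intro k hk s
    rw [pvLoopB]
    have : ¬ (0 < k ∧ 2 ≤ s.length) := by omega
    simp [this]
  | succ n ih =>
    intro k hk s
    by_cases hs : 2 ≤ s.length
    · rw [pvLoopB]
      have hcond : 0 < k ∧ 2 ≤ s.length := ⟨by omega, hs⟩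
      simp only [hcond, and_self, dite_true]
      by_cases hfix : pvStepB rules s = s
      · simp only [hfix, if_true]
        exact pvIter_fix rules s (by rw [pvStepA_eq_stepB, hfix]) (n + 1)
      · simp only [hfix, if_false]
        rw [Function.iterate_succ_apply, pvStepA_eq_stepB]
        exact ih (k - 1) (by omega) (pvStepB rules s)
    · rw [pvIter_short rules s (by omega), pvLoopB]
      have : ¬ (0 < k ∧ 2 ≤ s.length) := by omega
      simp [this]

-- ===== VERDICT (by name: the statement is the Claim_ definition above) =====
theorem perform_pair_insertion_spec : Claim_equal_perform_pair_insertion := by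
  intro start rules nof_steps _
  unfold Spec_perform_pair_insertion perform_pair_insertion perform_pair_insertion_alt
  congr 1
  rw [pvFoldl_ignore_iterate (pvStepA rules) _ start.toList, PySem.List.length_pyRange_one]
  exact pvLoop_eq rules ((nof_steps - 0).toNat) nof_steps (by omega) start.toList
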